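-- pv_equiv track=rewrite | github.com/WildBill567/nn-toy | neat/feedforwardphenome.py | find_feed_forward_layers
-- ===== SOURCE A (Python) =====
-- def find_feed_forward_layers(inputs, connections):
--     """
--     Collect the layers whose members can be evaluated in parallel in a feed-forward network.
--     Adapted from: https://github.com/CodeReclaimers/neat-python, accessed May 2016
--
--     :param inputs: list of the network input nodes
--     :param connections: list of (input, output) connections in the network.
--     Returns a list of layers, with each layer consisting of a set of node identifiers.
--
--     """
--
--     # TODO: Detect and omit nodes whose output is ultimately never used.
--
--     layers = []
--     prev_nodes = set(inputs)
--     prev_nodes.add(0)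
--     while 1:
--         # Find candidate nodes for the next layer.  These nodes should connect
--         # a node in S to a node not in S.
--         candidate_set = set(b for (a, b) in connections if a in prev_nodes and b not in prev_nodes)
--         # Keep only the nodes whose entire input set is contained in S.
--         keeper_set = set()
--         for n in candidate_set:
--             if all(a in prev_nodes for (a, b) in connections if b == n):
--                 keeper_set.add(n)
--
--         if not keeper_set:
--             break
--
--         layers.append(keeper_set)
--         prev_nodes = prev_nodes.union(keeper_set)
--
--     return layers
-- ===== SOURCE B (Python) =====
-- def find_feed_forward_layers(inputs, connections):
--     """Kahn-style layering: the predecessor map is built once, so each layer is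
--     read off by a readiness test per node instead of rescanning all connections
--     for every candidate."""
--     preds = {}
--     for a, b in connections:
--         preds.setdefault(b, []).append(a)
--     order = list(preds)
--
--     def ready(done):
--         return [n for n in order if n not in done and all(p in done for p in preds[n])]
--
--     layers = []
--     done = set(inputs) | {0}
--     frontier = ready(done)
--     while frontier:
--         layers.append(set(frontier))
--         done |= set(frontier)
--         frontier = ready(done)
--     return layers
-- ===== Notes on version B (the rewrite author's own statement) =====
-- stated objective: faster
-- what changed: B precomputes a predecessor map and the distinct-target order once, then reads each layer off with a per-node readiness test (all predecessors evaluated), instead of A's rebuilding a candidate set and rescanning the whole connection list for every candidate in every layer.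
import Mathlib
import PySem

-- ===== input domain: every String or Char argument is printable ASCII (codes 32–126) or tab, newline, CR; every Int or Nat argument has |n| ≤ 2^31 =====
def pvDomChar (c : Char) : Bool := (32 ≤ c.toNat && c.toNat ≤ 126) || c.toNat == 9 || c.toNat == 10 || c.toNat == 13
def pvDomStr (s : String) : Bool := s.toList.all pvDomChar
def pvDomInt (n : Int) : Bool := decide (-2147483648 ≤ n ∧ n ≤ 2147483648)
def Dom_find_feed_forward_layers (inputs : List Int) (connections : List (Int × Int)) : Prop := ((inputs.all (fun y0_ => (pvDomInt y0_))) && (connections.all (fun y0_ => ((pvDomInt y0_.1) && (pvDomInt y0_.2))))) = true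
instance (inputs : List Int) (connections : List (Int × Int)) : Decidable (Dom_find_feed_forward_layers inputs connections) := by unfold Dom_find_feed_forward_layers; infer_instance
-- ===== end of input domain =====

-- B precomputes a predecessor map once and reads each layer off with a per-node
-- readiness test, replacing A's per-candidate rescan of all connections (objective:
-- faster). Layers are Python sets; PySem.Set's first-insertion order is used in both
-- ports. Each while-loop is ported with fuel connections.length + 1, which its Python
-- never exhausts (every iteration before termination adds a distinct edge target to
-- the evaluated set, and there are at most connections.length of those).

-- ===== PORT A =====
-- one iteration of A's while-loop body: candidate set, then the per-candidate scan
def pvKeeperA (connections : List (Int × Int)) (S : PySem.Set Int) : PySem.Set Int :=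
  let cand : PySem.Set Int :=
    PySem.Set.ofList ((connections.filter (fun p => S.contains p.1 && !(S.contains p.2))).map Prod.snd)
  cand.foldl
    (fun ks n =>
      if (connections.filter (fun p => p.2 == n)).all (fun p => S.contains p.1) then
        PySem.Set.add ks n
      else ks)
    PySem.Set.empty

def pvLoopA (connections : List (Int × Int)) : Nat → PySem.Set Int → List (List Int) → List (List Int)
  | 0, _, layers => layers
  | Nat.succ f, S, layers =>
    let k := pvKeeperA connections S
    if k.isEmpty then layers
    else pvLoopA connections f (PySem.Set.union S k) (layers ++ [k])

def find_feed_forward_layers (inputs : List Int) (connections : List (Int × Int)) : List (List Int) :=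
  pvLoopA connections (connections.length + 1) (PySem.Set.add (PySem.Set.ofList inputs) 0) []

-- ===== PORT B =====
-- preds: for each edge target, the list of its edge sources (dict of lists, built once)
def pvPreds (connections : List (Int × Int)) : PySem.Dict Int (List Int) :=
  connections.foldl (fun d p => d.modify p.2 [] (fun l => l ++ [p.1])) PySem.Dict.empty

-- ready(done): the nodes (in first-appearance order of edge targets) not yet evaluated
-- whose predecessors are all evaluated; getD is exact: every n in order is a key of preds
def pvReady (preds : PySem.Dict Int (List Int)) (order : List Int) (done : PySem.Set Int) : List Int :=
  order.filter (fun n => !(PySem.Set.contains done n) && (preds.getD n []).all (fun p => PySem.Set.contains done p))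

def pvGrow (preds : PySem.Dict Int (List Int)) (order : List Int) :
    Nat → PySem.Set Int → List Int → List (List Int) → List (List Int)
  | 0, _, _, layers => layers
  | Nat.succ f, done, frontier, layers =>
    if frontier.isEmpty then layers
    else
      let layers' := layers ++ [PySem.Set.ofList frontier]
      let done' := PySem.Set.union done (PySem.Set.ofList frontier)
      pvGrow preds order f done' (pvReady preds order done') layers'

def find_feed_forward_layers_alt (inputs : List Int) (connections : List (Int × Int)) : List (List Int) :=
  let preds := pvPreds connections
  let order := preds.keys
  let done0 := PySem.Set.union (PySem.Set.ofList inputs) (PySem.Set.ofList [0])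
  pvGrow preds order (connections.length + 1) done0 (pvReady preds order done0) []

-- ===== PRECONDITION & SPEC =====
def Spec_find_feed_forward_layers (inputs : List Int) (connections : List (Int × Int)) (out : List (List Int)) : Prop := out = find_feed_forward_layers_alt inputs connections
instance (inputs : List Int) (connections : List (Int × Int)) (out : List (List Int)) : Decidable (Spec_find_feed_forward_layers inputs connections out) := by unfold Spec_find_feed_forward_layers; infer_instance

-- ===== CLAIM (what is proved, stated in full; the proofs are below) =====
def Claim_equal_find_feed_forward_layers : Prop := ∀ (inputs : List Int) (connections : List (Int × Int)), Dom_find_feed_forward_layers inputs connections → Spec_find_feed_forward_layers inputs connections (find_feed_forward_layers inputs connections)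

-- ===== LEMMAS AND PROOFS =====

-- the predecessor map: getD n [] is the source list of the edges into n
lemma pvPreds_getD (connections : List (Int × Int)) (d : PySem.Dict Int (List Int)) (n : Int) :
    (connections.foldl (fun d p => d.modify p.2 [] (fun l => l ++ [p.1])) d).getD n []
      = d.getD n [] ++ (connections.filter (fun p => p.2 == n)).map Prod.fst := by
  induction connections generalizing d with
  | nil => simp
  | cons p rest ih =>
    rw [List.foldl_cons, ih, PySem.Dict.getD_modify]
    by_cases h : p.2 = n
    · simp [h]
    · simp [h, Ne.symm h]

-- the key list of the predecessor map: the distinct edge targets, in first-appearance order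
lemma pvPreds_keys (connections : List (Int × Int)) :
    (pvPreds connections).keys = PySem.Set.ofList (connections.map Prod.snd) := by
  unfold pvPreds
  rw [PySem.Dict.keys_foldl_modify_key connections Prod.snd [] (fun _ p => (fun l => l ++ [p.1])) PySem.Dict.empty]
  simp [PySem.Set.update_nil_left]

-- set(xs) commutes with filtering: first occurrences of the kept values
lemma pvOfList_filter (P : Int → Bool) (l : List Int) :
    (PySem.Set.ofList l).filter P = PySem.Set.ofList (l.filter P) := by
  induction l using List.reverseRecOn with
  | nil => rfl
  | append_singleton l x ih =>
    rw [PySem.Set.ofList_append_singleton, List.filter_append]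
    by_cases hx : P x = true
    · rw [show List.filter P [x] = [x] from by simp [hx], ← PySem.Set.ofList_append_singleton]
      rw [PySem.Set.ofList_append_singleton, PySem.Set.ofList_append_singleton]
      by_cases hmem : x ∈ PySem.Set.ofList l
      · have hmem' : x ∈ PySem.Set.ofList (l.filter P) := by
          rw [PySem.Set.mem_ofList] at hmem ⊢
          exact List.mem_filter.mpr ⟨hmem, hx⟩
        rw [PySem.Set.add_of_mem hmem, PySem.Set.add_of_mem hmem', ih]
      · have hmem' : x ∉ PySem.Set.ofList (l.filter P) := by
          rw [PySem.Set.mem_ofList] at hmem ⊢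
          exact fun h => hmem (List.mem_filter.mp h).1
        rw [PySem.Set.add_of_not_mem hmem, PySem.Set.add_of_not_mem hmem',
            List.filter_append, ih]
        simp [hx]
    · have hx' : P x = false := by simpa using hx
      rw [show List.filter P [x] = [] from by simp [hx'], List.append_nil]
      by_cases hmem : x ∈ PySem.Set.ofList l
      · rw [PySem.Set.add_of_mem hmem, ih]
      · rw [PySem.Set.add_of_not_mem hmem, List.filter_append, ih]
        simp [hx']

-- A's conditional-add fold over a duplicate-free list disjoint from the accumulator is a filter
lemma pvFoldA_filter (P : Int → Bool) (xs : List Int) (ks : PySem.Set Int)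
    (hnd : xs.Nodup) (h : ∀ x ∈ xs, x ∉ ks) :
    xs.foldl (fun ks n => if P n then PySem.Set.add ks n else ks) ks
      = ks ++ xs.filter P := by
  induction xs generalizing ks with
  | nil => simp
  | cons x rest ih =>
    have hxr : x ∉ rest := (List.nodup_cons.mp hnd).1
    have hrest : rest.Nodup := (List.nodup_cons.mp hnd).2
    rw [List.foldl_cons]
    by_cases hp : P x = true
    · have hdisj : ∀ y ∈ rest, y ∉ ks ++ [x] := by
        intro y hy hmem
        rcases List.mem_append.mp hmem with hy1 | hy2
        · exact h y (List.mem_cons_of_mem _ hy) hy1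
        · rw [List.mem_singleton] at hy2
          exact hxr (hy2 ▸ hy)
      rw [if_pos hp, PySem.Set.add_of_not_mem (h x (List.mem_cons_self)), ih _ hrest hdisj]
      simp [hp]
    · rw [if_neg hp, ih _ hrest (fun y hy => h y (List.mem_cons_of_mem _ hy))]
      simp [hp]

-- the readiness pass over the key order computes exactly A's keeper set, in the same order
lemma pvReady_eq_keeper (connections : List (Int × Int)) (S : PySem.Set Int) :
    pvReady (pvPreds connections) (pvPreds connections).keys S = pvKeeperA connections S := by
  unfold pvReady pvKeeperA
  -- A's side: the fold is a filter over the (duplicate-free) candidate list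
  rw [pvFoldA_filter _ _ _ (PySem.Set.nodup_ofList _) (by simp [PySem.Set.empty])]
  simp only [PySem.Set.empty, List.nil_append]
  -- B's side: rewrite preds lookups and the key order
  rw [pvPreds_keys]
  have hfB : ∀ n : Int,
      (!(PySem.Set.contains S n) && ((pvPreds connections).getD n []).all (fun p => PySem.Set.contains S p))
        = (!(PySem.Set.contains S n) && (connections.filter (fun p => p.2 == n)).all (fun p => PySem.Set.contains S p.1)) := by
    intro n
    rw [show (pvPreds connections).getD n [] = _ from pvPreds_getD connections PySem.Dict.empty n]
    simp [List.all_map, Function.comp]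
  rw [List.filter_congr (fun n _ => hfB n)]
  -- turn both sides into ofList of an edge filter
  rw [pvOfList_filter, pvOfList_filter, List.filter_map, List.filter_map, List.filter_filter]
  congr 2
  apply List.filter_congr
  intro p hp
  simp only [Function.comp]
  by_cases h2 : S.contains p.2 = true
  · by_cases hall : ((connections.filter (fun q => q.2 == p.2)).all fun q => PySem.Set.contains S q.1) = true
    · rw [h2, hall]; simp
    · rw [Bool.not_eq_true] at hall; rw [h2, hall]; simp
  · have h2' : S.contains p.2 = false := by simpa using h2
    by_cases hall : ((connections.filter (fun q => q.2 == p.2)).all fun q => PySem.Set.contains S q.1) = true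
    · have h1 : S.contains p.1 = true :=
        List.all_eq_true.mp hall p (List.mem_filter.mpr ⟨hp, by simp⟩)
      rw [h2', hall, h1]; simp
    · rw [Bool.not_eq_true] at hall; rw [h2', hall]; simp

-- ofList is the identity on a layer (a filter of a duplicate-free list)
lemma pvKeeper_ofList (connections : List (Int × Int)) (S : PySem.Set Int) :
    PySem.Set.ofList (pvKeeperA connections S) = pvKeeperA connections S := by
  rw [← pvReady_eq_keeper]
  apply PySem.Set.ofList_eq_self_of_nodup
  exact List.Nodup.filter _ (by rw [pvPreds_keys]; exact PySem.Set.nodup_ofList _)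

-- the two while-loops agree
lemma pvLoop_eq (connections : List (Int × Int)) (f : Nat) (S : PySem.Set Int) (layers : List (List Int)) :
    pvLoopA connections f S layers
      = pvGrow (pvPreds connections) (pvPreds connections).keys f S
          (pvReady (pvPreds connections) (pvPreds connections).keys S) layers := by
  induction f generalizing S layers with
  | zero => rfl
  | succ f ih =>
    rw [pvLoopA, pvGrow]
    simp only [pvReady_eq_keeper, pvKeeper_ofList]
    by_cases h : (pvKeeperA connections S).isEmpty <;> simp [h, ih, pvReady_eq_keeper]

-- the two initial evaluated sets agree: set(inputs) with 0 added vs set(inputs) | {0}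
lemma pvInit_eq (inputs : List Int) :
    PySem.Set.add (PySem.Set.ofList inputs) 0
      = PySem.Set.union (PySem.Set.ofList inputs) (PySem.Set.ofList [0]) := by
  rfl

-- ===== VERDICT (by name: the statement is the Claim_ definition above) =====
theorem find_feed_forward_layers_spec : Claim_equal_find_feed_forward_layers := by
  intro inputs connections _
  unfold Spec_find_feed_forward_layers find_feed_forward_layers find_feed_forward_layers_alt
  rw [pvInit_eq]
  exact pvLoop_eq connections _ _ _
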